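-- pv_equiv track=rewrite | github.com/lindalw/CDM | photobook_dataset/discriminator/helpers.py | create_inv_list
-- ===== SOURCE A (Python) =====
-- def create_inv_list(segment_ids):
--     # Get inverted dict {seg_id:dataset_ind}
--     inv_dict = {}
--     for data_i in range(len(segment_ids)):
--         inv_dict[segment_ids[data_i]] = data_i
--     # Sort it based on segmentids
--     keys = list(inv_dict)
--     keys.sort()
--     inv_list = [inv_dict[key] for key in keys]
--
--     return inv_list
-- ===== SOURCE B (Python) =====
-- def create_inv_list(segment_ids):
--     # Sort index positions by (segment id, index); one linear pass keeps the
--     # last index of each run of equal segment ids.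
--     order = sorted(range(len(segment_ids)), key=lambda i: (segment_ids[i], i))
--     inv_list = []
--     cur = None
--     for i in order:
--         sid = segment_ids[i]
--         if inv_list and sid == cur:
--             inv_list[-1] = i
--         else:
--             inv_list.append(i)
--             cur = sid
--     return inv_list
-- ===== Notes on version B (the rewrite author's own statement) =====
-- stated objective: alternative
-- what changed: Replaces the dict-of-last-occurrences plus key sort with sorting the index positions by (segment id, index) and a single group-scan over that order that keeps the last index of each run.
import Mathlib
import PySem

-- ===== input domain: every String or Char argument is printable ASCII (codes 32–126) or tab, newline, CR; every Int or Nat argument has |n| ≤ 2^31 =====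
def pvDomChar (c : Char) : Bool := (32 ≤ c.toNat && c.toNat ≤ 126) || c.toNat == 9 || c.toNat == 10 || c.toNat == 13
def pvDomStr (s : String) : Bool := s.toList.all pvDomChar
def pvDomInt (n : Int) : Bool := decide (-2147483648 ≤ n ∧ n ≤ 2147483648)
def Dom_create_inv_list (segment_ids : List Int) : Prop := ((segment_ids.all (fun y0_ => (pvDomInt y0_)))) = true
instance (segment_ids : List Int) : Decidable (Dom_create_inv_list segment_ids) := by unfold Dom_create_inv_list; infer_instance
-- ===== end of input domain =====

-- B replaces A's dict of last occurrences + key sort by sorting the index positions by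
-- (segment id, index) and one group-scan keeping the last index of each run (objective: alternative).

-- ===== PORT A =====
-- A: build dict {seg_id: last index}, sort its keys, map lookups.
-- data_i ranges over range(len(segment_ids)), so segment_ids[data_i] never raises: pyGetD is exact;
-- inv_dict[key] is looked up only at key ∈ keys, so getD is exact.
def create_inv_list (segment_ids : List Int) : List Int :=
  let inv_dict : PySem.Dict Int Int :=
    (PySem.List.pyRange 0 (PySem.List.len segment_ids)).foldl
      (fun d data_i => d.insert (PySem.List.pyGetD segment_ids data_i 0) data_i) PySem.Dict.empty
  let keys := PySem.List.sorted inv_dict.keys (fun x => x)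
  keys.map (fun key => inv_dict.getD key 0)

-- ===== PORT B =====
-- one loop iteration of B's scan: overwrite the last entry inside a run of equal segment ids,
-- otherwise start a new run (i is drawn from range(len(segment_ids)), so pyGetD is exact)
def pvScanStep (segment_ids : List Int) (st : List Int × Option Int) (i : Int) : List Int × Option Int :=
  let sid := PySem.List.pyGetD segment_ids i 0
  if st.1 ≠ [] ∧ st.2 = some sid then (st.1.dropLast ++ [i], st.2)
  else (st.1 ++ [i], some sid)

def create_inv_list_alt (segment_ids : List Int) : List Int :=
  let order := PySem.List.sorted2 (PySem.List.pyRange 0 (PySem.List.len segment_ids))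
      (fun i => PySem.List.pyGetD segment_ids i 0) (fun i => i)
  (order.foldl (pvScanStep segment_ids) ([], none)).1

-- ===== PRECONDITION & SPEC =====
def Spec_create_inv_list (segment_ids : List Int) (out : List Int) : Prop := out = create_inv_list_alt segment_ids
instance (segment_ids : List Int) (out : List Int) : Decidable (Spec_create_inv_list segment_ids out) := by unfold Spec_create_inv_list; infer_instance

-- ===== CLAIM (what is proved, stated in full; the proofs are below) =====
def Claim_equal_create_inv_list : Prop := ∀ (segment_ids : List Int), Dom_create_inv_list segment_ids → Spec_create_inv_list segment_ids (create_inv_list segment_ids)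

-- ===== LEMMAS AND PROOFS =====

-- the indices holding segment id v, in ascending order
def pvGroup (seg : List Int) (v : Int) : List Int :=
  (PySem.List.pyRange 0 (PySem.List.len seg)).filter (fun i => PySem.List.pyGetD seg i 0 == v)

-- the distinct segment ids, sorted ascending
def pvSvals (seg : List Int) : List Int :=
  PySem.List.sorted (PySem.Set.ofList seg) (fun x => x)

lemma pvRange_pairwise (n : Nat) :
    List.Pairwise (· < ·) (PySem.List.pyRange 0 (n : Int)) := by
  rw [PySem.List.pyRange_zero_natCast]
  exact List.pairwise_map.mpr (by simpa using List.pairwise_lt_range)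

lemma pvLen_eq (seg : List Int) : PySem.List.len seg = (seg.length : Int) := by
  simp [PySem.List.len]

lemma pvKey_mem {seg : List Int} {i : Int} (h : i ∈ PySem.List.pyRange 0 (PySem.List.len seg)) :
    PySem.List.pyGetD seg i 0 ∈ seg := by
  rw [pvLen_eq] at h
  obtain ⟨h0, h1⟩ := PySem.List.mem_pyRange_one.mp h
  rw [PySem.List.pyGetD_eq_getElem seg 0 h0 (by exact_mod_cast h1)]
  exact List.getElem_mem _

lemma pvMem_group {seg : List Int} {v i : Int} (h : i ∈ pvGroup seg v) :
    i ∈ PySem.List.pyRange 0 (PySem.List.len seg) ∧ PySem.List.pyGetD seg i 0 = v := by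
  unfold pvGroup at h
  have := List.of_mem_filter h
  exact ⟨List.mem_of_mem_filter h, by simpa using this⟩

lemma pvGroup_ne_nil {seg : List Int} {v : Int} (hv : v ∈ pvSvals seg) :
    pvGroup seg v ≠ [] := by
  have hv' : v ∈ seg := by
    have := (PySem.List.mem_sorted _ _ _ _).mp hv
    exact (PySem.Set.mem_ofList _ _).mp this
  obtain ⟨n, hn, he⟩ := List.mem_iff_getElem.mp hv'
  have hmem : (n : Int) ∈ PySem.List.pyRange 0 (PySem.List.len seg) := by
    rw [pvLen_eq]
    exact PySem.List.mem_pyRange_one.mpr ⟨by positivity, by exact_mod_cast hn⟩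
  have hk : PySem.List.pyGetD seg (n : Int) 0 = v := by
    rw [PySem.List.pyGetD_eq_getElem seg 0 (by positivity) (by exact_mod_cast hn)]
    simpa using he
  intro hnil
  have : (n : Int) ∈ pvGroup seg v := by
    unfold pvGroup
    exact List.mem_filter.mpr ⟨hmem, by simp [hk]⟩
  rw [hnil] at this
  exact absurd this (List.not_mem_nil)

-- A's dict loop: lookup after the loop is the LAST matching index
lemma pvGetD_foldl_insert (seg : List Int) (l : List Int) (d : PySem.Dict Int Int) (v d0 : Int) :
    (l.foldl (fun d i => d.insert (PySem.List.pyGetD seg i 0) i) d).getD v d0 =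
      match (l.filter (fun i => PySem.List.pyGetD seg i 0 == v)).getLast? with
      | some a => a
      | none => d.getD v d0 := by
  induction l using List.reverseRecOn with
  | nil => simp
  | append_singleton t a ih =>
      rw [List.foldl_append, List.filter_append]
      simp only [List.foldl_cons, List.foldl_nil, List.filter]
      by_cases h : PySem.List.pyGetD seg a 0 = v
      · simp [h]
      · have hb : (PySem.List.pyGetD seg a 0 == v) = false := by simpa using h
        rw [hb]
        simp only [List.append_nil]
        rw [PySem.Dict.getD_insert]
        simp [Ne.symm h, ih]

-- disjoint filters concatenated are a permutation of the disjunction filter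
lemma pvFilter_disjoint_perm (p q : Int → Bool) (l : List Int)
    (hdisj : ∀ x, ¬(p x = true ∧ q x = true)) :
    (l.filter p ++ l.filter q).Perm (l.filter (fun x => p x || q x)) := by
  induction l with
  | nil => simp
  | cons x t ih =>
      by_cases hp : p x = true
      · have hq : q x = false := by
          cases hq : q x
          · rfl
          · exact absurd ⟨hp, hq⟩ (hdisj x)
        simpa [List.filter_cons, hp, hq] using ih.cons x
      · have hp' : p x = false := by simpa using hp
        by_cases hq : q x = true
        · simp only [List.filter_cons, hp', hq, Bool.false_or]
          exact (List.perm_middle).trans (ih.cons x)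
        · have hq' : q x = false := by simpa using hq
          simpa [List.filter_cons, hp', hq'] using ih

lemma pvFlatMap_perm (f : Int → Int) (vs : List Int) (l : List Int) (hnd : vs.Nodup) :
    (vs.flatMap (fun v => l.filter (fun i => f i == v))).Perm
      (l.filter (fun i => decide (f i ∈ vs))) := by
  induction vs with
  | nil => simp
  | cons v vs ih =>
      have hnd' : vs.Nodup := hnd.of_cons
      have hv : v ∉ vs := by simp at hnd; exact hnd.1
      rw [List.flatMap_cons]
      refine (List.Perm.append_left (l.filter (fun i => f i == v)) (ih hnd')).trans ?_
      have h2 := pvFilter_disjoint_perm (fun i => f i == v) (fun i => decide (f i ∈ vs)) l ?_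
      · refine h2.trans ?_
        apply List.Perm.of_eq
        apply List.filter_congr
        intro x _
        simp only [List.mem_cons]
        by_cases h : f x = v <;> simp [h]
      · intro x hx
        rcases hx with ⟨h1', h2'⟩
        simp only [beq_iff_eq] at h1'
        simp only [decide_eq_true_eq] at h2'
        exact hv (h1' ▸ h2')

-- sorted2 with two Int keys is sorted with the lexicographic key
lemma pvSorted2_eq_sorted_lex (xs : List Int) (k1 k2 : Int → Int) :
    PySem.List.sorted2 xs k1 k2 = PySem.List.sorted xs (fun x => toLex (k1 x, k2 x)) := by
  have h : (fun (a b : Int) => decide (k1 a < k1 b) || (!decide (k1 b < k1 a) && decide (k2 a < k2 b)))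
      = (fun (a b : Int) => decide ((toLex (k1 a, k2 a)) < toLex (k1 b, k2 b))) := by
    funext a b
    by_cases h1 : k1 a < k1 b <;> by_cases h2 : k1 b < k1 a <;> by_cases h3 : k2 a < k2 b <;>
      simp [Prod.Lex.lt_iff, h1, h2, h3] <;> omega
  show List.foldl (fun acc x => PySem.List.insertBy _ x acc) [] xs
      = List.foldl (fun acc x => PySem.List.insertBy _ x acc) [] xs
  rw [h]

-- B's sort, characterized: groups of indices in ascending order of segment id
lemma pvOrder_eq (seg : List Int) :
    PySem.List.sorted2 (PySem.List.pyRange 0 (PySem.List.len seg))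
        (fun i => PySem.List.pyGetD seg i 0) (fun i => i)
      = (pvSvals seg).flatMap (pvGroup seg) := by
  rw [pvSorted2_eq_sorted_lex]
  apply PySem.List.sorted_eq_of_perm_of_pairwise_lt
  · have hnd : (pvSvals seg).Nodup := by
      have hperm := PySem.List.sorted_perm (PySem.Set.ofList seg) (fun x => x) false
      exact hperm.nodup_iff.mpr (PySem.Set.nodup_ofList seg)
    have h := pvFlatMap_perm (fun i => PySem.List.pyGetD seg i 0) (pvSvals seg)
        (PySem.List.pyRange 0 (PySem.List.len seg)) hnd
    have he : (PySem.List.pyRange 0 (PySem.List.len seg)).filter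
        (fun i => decide (PySem.List.pyGetD seg i 0 ∈ pvSvals seg))
        = PySem.List.pyRange 0 (PySem.List.len seg) := by
      apply List.filter_eq_self.mpr
      intro i hi
      simp only [decide_eq_true_eq, pvSvals, PySem.List.mem_sorted, PySem.Set.mem_ofList]
      exact pvKey_mem hi
    rw [he] at h
    exact h
  · apply List.pairwise_flatMap.mpr
    constructor
    · intro v _
      have hpw : (pvGroup seg v).Pairwise (· < ·) := by
        have := pvRange_pairwise seg.length
        rw [← pvLen_eq] at this
        exact this.filter _
      refine hpw.imp_of_mem ?_
      intro a b ha hb hab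
      have hka := (pvMem_group ha).2
      have hkb := (pvMem_group hb).2
      exact Prod.Lex.lt_iff.mpr (by simp [hka, hkb, hab])
    · have hpw : (pvSvals seg).Pairwise (· < ·) := PySem.List.sorted_ofList_pairwise_lt seg
      refine hpw.imp_of_mem ?_
      intro v w _ _ hvw a ha b hb
      have hka := (pvMem_group ha).2
      have hkb := (pvMem_group hb).2
      exact Prod.Lex.lt_iff.mpr (by simp [hka, hkb]; omega)

-- B's scan across one run of equal segment ids overwrites the last entry
lemma pvScan_run (seg : List Int) (v : Int) (t : List Int)
    (ht : ∀ j ∈ t, PySem.List.pyGetD seg j 0 = v) (acc : List Int) (b : Int) :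
    t.foldl (pvScanStep seg) (acc ++ [b], some v)
      = (acc ++ [(b :: t).getLast (List.cons_ne_nil _ _)], some v) := by
  induction t generalizing b with
  | nil => simp
  | cons j t' ih =>
      have hj : PySem.List.pyGetD seg j 0 = v := ht j (List.mem_cons_self)
      rw [List.foldl_cons]
      have hstep : pvScanStep seg (acc ++ [b], some v) j = (acc ++ [j], some v) := by
        unfold pvScanStep
        rw [if_pos ⟨by simp, by rw [hj]⟩]
        simp
      rw [hstep, ih (fun x hx => ht x (List.mem_cons_of_mem _ hx)) j]
      simp [List.getLast_cons]

lemma pvScan_group (seg : List Int) (v : Int) (g : List Int) (hg : g ≠ [])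
    (hk : ∀ i ∈ g, PySem.List.pyGetD seg i 0 = v) (acc : List Int) (cur : Option Int)
    (hcur : cur ≠ some v) :
    g.foldl (pvScanStep seg) (acc, cur) = (acc ++ [(g.getLast?).getD 0], some v) := by
  match g with
  | [] => exact absurd rfl hg
  | i :: t =>
      have hi : PySem.List.pyGetD seg i 0 = v := hk i (List.mem_cons_self)
      rw [List.foldl_cons]
      have hstep : pvScanStep seg (acc, cur) i = (acc ++ [i], some v) := by
        unfold pvScanStep
        rw [if_neg (by rw [hi]; tauto)]
        rw [hi]
      rw [hstep, pvScan_run seg v t (fun x hx => hk x (List.mem_cons_of_mem _ hx)) acc i]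
      rw [List.getLast?_eq_some_getLast (List.cons_ne_nil _ _)]
      simp

lemma pvScan_flatMap (seg : List Int) (vs : List Int) (acc : List Int) (cur : Option Int)
    (hpw : vs.Pairwise (· < ·))
    (hcur : ∀ v ∈ vs, cur ≠ some v)
    (hne : ∀ v ∈ vs, pvGroup seg v ≠ []) :
    (vs.flatMap (pvGroup seg)).foldl (pvScanStep seg) (acc, cur)
      = (acc ++ vs.map (fun v => ((pvGroup seg v).getLast?).getD 0),
         match vs.getLast? with | some v => some v | none => cur) := by
  induction vs generalizing acc cur with
  | nil => simp
  | cons v vs ih =>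
      rw [List.flatMap_cons, List.foldl_append]
      rw [pvScan_group seg v _ (hne v List.mem_cons_self)
        (fun i hi => (pvMem_group hi).2) acc cur (hcur v List.mem_cons_self)]
      rw [ih (acc ++ [(pvGroup seg v).getLast?.getD 0]) (some v) hpw.of_cons
        (fun w hw h => by
          have := List.rel_of_pairwise_cons hpw hw
          exact absurd (Option.some.inj h) (by omega))
        (fun w hw => hne w (List.mem_cons_of_mem _ hw))]
      rw [List.getLast?_cons]
      cases h : vs.getLast? <;> simp

lemma pvA_eq (seg : List Int) :
    create_inv_list seg = (pvSvals seg).map (fun v => ((pvGroup seg v).getLast?).getD 0) := by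
  unfold create_inv_list
  show (PySem.List.sorted ((PySem.List.pyRange 0 (PySem.List.len seg)).foldl
      (fun d data_i => d.insert (PySem.List.pyGetD seg data_i 0) data_i)
      (PySem.Dict.empty : PySem.Dict Int Int)).keys (fun x => x)).map
      (fun key => ((PySem.List.pyRange 0 (PySem.List.len seg)).foldl
        (fun d data_i => d.insert (PySem.List.pyGetD seg data_i 0) data_i)
        (PySem.Dict.empty : PySem.Dict Int Int)).getD key 0) = _
  have hkeys : ((PySem.List.pyRange 0 (PySem.List.len seg)).foldl
      (fun d data_i => d.insert (PySem.List.pyGetD seg data_i 0) data_i)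
      (PySem.Dict.empty : PySem.Dict Int Int)).keys = PySem.Set.ofList seg := by
    rw [PySem.Dict.keys_foldl_insert_key _ (fun i => PySem.List.pyGetD seg i 0)
      (fun _ i => i) PySem.Dict.empty]
    rw [PySem.List.map_pyGetD_pyRange_zero seg 0]
    rfl
  rw [hkeys]
  apply List.map_congr_left
  intro v hv
  rw [pvGetD_foldl_insert]
  cases h : ((PySem.List.pyRange 0 (PySem.List.len seg)).filter
      (fun i => PySem.List.pyGetD seg i 0 == v)).getLast? with
  | none =>
      exfalso
      exact pvGroup_ne_nil hv (by unfold pvGroup; exact List.getLast?_eq_none_iff.mp h)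
  | some a =>
      have : (pvGroup seg v).getLast? = some a := h
      rw [this]
      rfl

lemma pvB_eq (seg : List Int) :
    create_inv_list_alt seg = (pvSvals seg).map (fun v => ((pvGroup seg v).getLast?).getD 0) := by
  unfold create_inv_list_alt
  rw [pvOrder_eq]
  show (((pvSvals seg).flatMap (pvGroup seg)).foldl (pvScanStep seg) ([], none)).1 = _
  rw [pvScan_flatMap seg (pvSvals seg) [] none
    (PySem.List.sorted_ofList_pairwise_lt seg)
    (fun v _ h => by exact absurd h (by simp))
    (fun v hv => pvGroup_ne_nil hv)]
  simp

-- ===== VERDICT (by name: the statement is the Claim_ definition above) =====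
theorem create_inv_list_spec : Claim_equal_create_inv_list := by
  intro seg _
  unfold Spec_create_inv_list
  rw [pvA_eq, pvB_eq]
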